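-- pv_equiv track=rewrite | github.com/junu-kk/coding-test | 이코테/2-구현/기둥과보설치-첫시도.py | bo_delete_test
-- ===== SOURCE A (Python) =====
-- GIDUNG = 0
--
-- BO = 1
--
-- def gidung_create_test(x,y, frame):
--     if y == 0 or [x-1, y, 1] in frame or [x+1, y, 1] in frame or [x, y-1, 0] in frame:
--         return True
--     return False
--
-- def bo_create_test(x,y, frame):
--     if [x,y-1,0] in frame or [x+1,y-1,0] in frame or ([x-1,y,1] in frame and [x+1,y,1] in frame):
--         return True
--     else:
--         return False
--
-- def bo_delete_test(x,y,frame):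
--     for each in frame:
--         if each[0] == x and each[1] == y and each[2] == GIDUNG:
--             if not gidung_create_test(each[0],each[1],frame):
--                 return False
--         if each[0] == x and each[1] == y and each[2] == BO:
--             if not bo_create_test(each[0],each[1],frame):
--                 return False
--         if each[0] == x+1 and each[1] == y and each[2] == GIDUNG:
--             if not gidung_create_test(each[0],each[1],frame):
--                 return False
--         if each[0] == x+1 and each[1] == y and each[2] == BO:
--             if not bo_create_test(each[0],each[1],frame):
--                 return False
--     return True
-- ===== SOURCE B (Python) =====
-- GIDUNG = 0
--
-- BO = 1
--
-- def bo_delete_test(x, y, frame):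
--     # Hash-index approach: index the frame once as two sets of tuples (exact
--     # pieces and 3-prefixes), then check only the four pieces that could be
--     # affected, with O(1) lookups and the validity rules inlined over the set.
--     exact = {tuple(e) for e in frame}
--     prefixes = {tuple(e[:3]) for e in frame}
--
--     def gidung_ok(cx):
--         return (y == 0 or (cx - 1, y, 1) in exact or (cx + 1, y, 1) in exact
--                 or (cx, y - 1, 0) in exact)
--
--     def bo_ok(cx):
--         return ((cx, y - 1, 0) in exact or (cx + 1, y - 1, 0) in exact
--                 or ((cx - 1, y, 1) in exact and (cx + 1, y, 1) in exact))
--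
--     return all(ok(cx)
--                for cx in (x, x + 1)
--                for t, ok in ((GIDUNG, gidung_ok), (BO, bo_ok))
--                if (cx, y, t) in prefixes)
-- ===== Notes on version B (the rewrite author's own statement) =====
-- stated objective: alternative
-- what changed: B replaces A's frame scan with helper functions that each rescan the list by a hash index built once (two sets of tuples: exact pieces and 3-prefixes); it then checks only the four affected candidate pieces with O(1) set lookups and the validity rules inlined over the set.
-- outside the precondition, e.g. on bo_delete_test(-2, -2, [[-2, -2, 0], []]): A returns False, B returns False; on bo_delete_test(0, 0, [[]]): A raises IndexError, B returns True
import Mathlib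
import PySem

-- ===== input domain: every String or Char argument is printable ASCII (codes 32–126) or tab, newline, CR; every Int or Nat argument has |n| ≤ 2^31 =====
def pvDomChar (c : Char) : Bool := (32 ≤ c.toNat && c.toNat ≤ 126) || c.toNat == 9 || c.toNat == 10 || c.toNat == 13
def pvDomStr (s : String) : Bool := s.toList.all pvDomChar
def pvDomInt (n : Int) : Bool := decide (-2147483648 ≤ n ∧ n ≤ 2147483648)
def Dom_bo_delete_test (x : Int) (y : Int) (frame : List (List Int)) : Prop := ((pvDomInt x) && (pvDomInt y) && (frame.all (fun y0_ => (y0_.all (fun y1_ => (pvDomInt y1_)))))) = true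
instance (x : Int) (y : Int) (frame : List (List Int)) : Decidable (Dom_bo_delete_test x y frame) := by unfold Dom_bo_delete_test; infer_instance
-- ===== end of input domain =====

-- B indexes the frame once as two hash sets (exact pieces and 3-prefixes) and checks
-- only the four affected candidate pieces with O(1) set lookups (alternative: hash-index decomposition).


-- ===== PORT A =====
def gidung_create_test (x : Int) (y : Int) (frame : List (List Int)) : Bool :=
  if y == 0 || frame.contains [x-1, y, 1] || frame.contains [x+1, y, 1] || frame.contains [x, y-1, 0] then
    true
  else
    false

def bo_create_test (x : Int) (y : Int) (frame : List (List Int)) : Bool :=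
  if frame.contains [x, y-1, 0] || frame.contains [x+1, y-1, 0] || (frame.contains [x-1, y, 1] && frame.contains [x+1, y, 1]) then
    true
  else
    false

-- the for-loop of A; e[i] is PySem.List.pyGet? (none = IndexError, excluded by Pre_)
def boDelGo (x : Int) (y : Int) (frame : List (List Int)) : List (List Int) → Bool
  | [] => true
  | e :: tl =>
    if (PySem.List.pyGet? e 0 == some x && PySem.List.pyGet? e 1 == some y && PySem.List.pyGet? e 2 == some 0)
        && !gidung_create_test x y frame then false
    else if (PySem.List.pyGet? e 0 == some x && PySem.List.pyGet? e 1 == some y && PySem.List.pyGet? e 2 == some 1)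
        && !bo_create_test x y frame then false
    else if (PySem.List.pyGet? e 0 == some (x+1) && PySem.List.pyGet? e 1 == some y && PySem.List.pyGet? e 2 == some 0)
        && !gidung_create_test (x+1) y frame then false
    else if (PySem.List.pyGet? e 0 == some (x+1) && PySem.List.pyGet? e 1 == some y && PySem.List.pyGet? e 2 == some 1)
        && !bo_create_test (x+1) y frame then false
    else boDelGo x y frame tl

def bo_delete_test (x : Int) (y : Int) (frame : List (List Int)) : Bool :=
  boDelGo x y frame frame

-- ===== PORT B =====
-- B's inner validity predicates, inlined over the set 'exact' (set of whole pieces)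
def pvGidungOk (y : Int) (exact : PySem.Set (List Int)) (cx : Int) : Bool :=
  y == 0 || exact.contains [cx-1, y, 1] || exact.contains [cx+1, y, 1] || exact.contains [cx, y-1, 0]

def pvBoOk (y : Int) (exact : PySem.Set (List Int)) (cx : Int) : Bool :=
  exact.contains [cx, y-1, 0] || exact.contains [cx+1, y-1, 0] || (exact.contains [cx-1, y, 1] && exact.contains [cx+1, y, 1])

-- the all(...) over the four candidates (cx, t) with the 'if (cx,y,t) in prefixes' filter
def bo_delete_test_alt (x : Int) (y : Int) (frame : List (List Int)) : Bool :=
  let exact := PySem.Set.ofList frame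
  let prefixes := PySem.Set.ofList (frame.map (fun e => PySem.List.slice e none (some 3)))
  ([(x, 0), (x, 1), (x+1, 0), (x+1, 1)] : List (Int × Int)).all (fun p =>
    if prefixes.contains [p.1, y, p.2] then
      if p.2 == 0 then pvGidungOk y exact p.1 else pvBoOk y exact p.1
    else true)

-- ===== PRECONDITION & SPEC =====
-- Pre_ excludes every frame containing a malformed element (too short to carry the
-- three fields A reads when its first fields match x or x+1): on those Python A
-- raises IndexError unless an earlier element already made it return False — the
-- few such early-False inputs are excluded too, as the cited example records.
def Pre_bo_delete_test (x : Int) (y : Int) (frame : List (List Int)) : Prop :=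
  ∀ e ∈ frame, e ≠ [] ∧ ((e[0]? = some x ∨ e[0]? = some (x+1)) →
    2 ≤ e.length ∧ (e[1]? = some y → 3 ≤ e.length))
instance (x : Int) (y : Int) (frame : List (List Int)) : Decidable (Pre_bo_delete_test x y frame) := by
  unfold Pre_bo_delete_test; infer_instance

def pvWitness_bo_delete_test : Int × Int × List (List Int) :=
  (0, 1, [[0, 1, 0], [0, 0, 0], [1, 1, 1], [5, 5]])

def Spec_bo_delete_test (x : Int) (y : Int) (frame : List (List Int)) (out : Bool) : Prop := out = bo_delete_test_alt x y frame
instance (x : Int) (y : Int) (frame : List (List Int)) (out : Bool) : Decidable (Spec_bo_delete_test x y frame out) := by unfold Spec_bo_delete_test; infer_instance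

-- ===== CLAIM (what is proved, stated in full; the proofs are below) =====
def Claim_equal_bo_delete_test : Prop := ∀ (x : Int) (y : Int) (frame : List (List Int)), Dom_bo_delete_test x y frame → Pre_bo_delete_test x y frame → Spec_bo_delete_test x y frame (bo_delete_test x y frame)

-- ===== LEMMAS AND PROOFS =====

-- the per-element obligation both loops implement
def pvOk (x : Int) (y : Int) (frame : List (List Int)) (e : List Int) : Prop :=
  (e.take 3 = [x, y, 0] → gidung_create_test x y frame = true) ∧
  (e.take 3 = [x, y, 1] → bo_create_test x y frame = true) ∧
  (e.take 3 = [x+1, y, 0] → gidung_create_test (x+1) y frame = true) ∧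
  (e.take 3 = [x+1, y, 1] → bo_create_test (x+1) y frame = true)

-- the index-match of A's loop is exactly a 3-prefix match
theorem pvMatch_iff (e : List Int) (cx cy ct : Int) :
    ((PySem.List.pyGet? e 0 == some cx && PySem.List.pyGet? e 1 == some cy && PySem.List.pyGet? e 2 == some ct) = true)
      ↔ e.take 3 = [cx, cy, ct] := by
  have h0 : PySem.List.pyGet? e (0 : Int) = e[0]? := by
    simpa using PySem.List.pyGet?_natCast e 0
  have h1 : PySem.List.pyGet? e (1 : Int) = e[1]? := by
    simpa using PySem.List.pyGet?_natCast e 1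
  have h2 : PySem.List.pyGet? e (2 : Int) = e[2]? := by
    simpa using PySem.List.pyGet?_natCast e 2
  rw [h0, h1, h2]
  match e with
  | [] => simp
  | [a] => simp
  | [a, b] => simp
  | a :: b :: c :: tl => simp [List.take]; tauto

theorem boDelGo_eq_all (x y : Int) (frame rest : List (List Int)) :
    boDelGo x y frame rest = true ↔ ∀ e ∈ rest, pvOk x y frame e := by
  induction rest with
  | nil => simp [boDelGo]
  | cons e tl ih =>
    rw [boDelGo]
    split_ifs with h1 h2 h3 h4
    · rw [Bool.and_eq_true] at h1
      obtain ⟨hm, hg⟩ := h1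
      constructor
      · intro h; exact absurd h (by simp)
      · intro h
        have := (h e (by simp)).1 ((pvMatch_iff e x y 0).1 hm)
        rw [this] at hg; exact absurd hg (by simp)
    · rw [Bool.and_eq_true] at h2
      obtain ⟨hm, hg⟩ := h2
      constructor
      · intro h; exact absurd h (by simp)
      · intro h
        have := (h e (by simp)).2.1 ((pvMatch_iff e x y 1).1 hm)
        rw [this] at hg; exact absurd hg (by simp)
    · rw [Bool.and_eq_true] at h3
      obtain ⟨hm, hg⟩ := h3
      constructor
      · intro h; exact absurd h (by simp)
      · intro h
        have := (h e (by simp)).2.2.1 ((pvMatch_iff e (x+1) y 0).1 hm)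
        rw [this] at hg; exact absurd hg (by simp)
    · rw [Bool.and_eq_true] at h4
      obtain ⟨hm, hg⟩ := h4
      constructor
      · intro h; exact absurd h (by simp)
      · intro h
        have := (h e (by simp)).2.2.2 ((pvMatch_iff e (x+1) y 1).1 hm)
        rw [this] at hg; exact absurd hg (by simp)
    · rw [ih]
      constructor
      · intro h e' he'
        rcases List.mem_cons.1 he' with rfl | hm
        · refine ⟨?_, ?_, ?_, ?_⟩ <;> intro hp
          · cases hgb : gidung_create_test x y frame with
            | true => rfl
            | false => exact absurd (by rw [Bool.and_eq_true]
                                        exact ⟨(pvMatch_iff e' x y 0).2 hp, by rw [hgb]; rfl⟩) h1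
          · cases hgb : bo_create_test x y frame with
            | true => rfl
            | false => exact absurd (by rw [Bool.and_eq_true]
                                        exact ⟨(pvMatch_iff e' x y 1).2 hp, by rw [hgb]; rfl⟩) h2
          · cases hgb : gidung_create_test (x+1) y frame with
            | true => rfl
            | false => exact absurd (by rw [Bool.and_eq_true]
                                        exact ⟨(pvMatch_iff e' (x+1) y 0).2 hp, by rw [hgb]; rfl⟩) h3
          · cases hgb : bo_create_test (x+1) y frame with
            | true => rfl
            | false => exact absurd (by rw [Bool.and_eq_true]
                                        exact ⟨(pvMatch_iff e' (x+1) y 1).2 hp, by rw [hgb]; rfl⟩) h4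
        · exact h e' hm
      · intro h e' he'
        exact h e' (List.mem_cons_of_mem _ he')

-- set membership in the 'exact' index is list membership, so B's inlined predicates
-- coincide with A's helpers
theorem pvGidungOk_eq (y cx : Int) (frame : List (List Int)) :
    pvGidungOk y (PySem.Set.ofList frame) cx = gidung_create_test cx y frame := by
  have hy : (y == 0) = decide (y = 0) := by by_cases h : y = 0 <;> simp [h]
  simp [pvGidungOk, gidung_create_test, List.contains_eq_mem, hy]

theorem pvBoOk_eq (y cx : Int) (frame : List (List Int)) :
    pvBoOk y (PySem.Set.ofList frame) cx = bo_create_test cx y frame := by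
  simp [pvBoOk, bo_create_test, List.contains_eq_mem]

theorem alt_eq_all (x y : Int) (frame : List (List Int)) :
    bo_delete_test_alt x y frame = true ↔ ∀ e ∈ frame, pvOk x y frame e := by
  have hsl : ∀ e : List Int, PySem.List.slice e none (some 3) = e.take 3 := by
    intro e
    simpa using PySem.List.slice_to_natCast e 3
  unfold bo_delete_test_alt
  simp only [List.all_cons, List.all_nil, Bool.and_true, Bool.and_eq_true,
    pvGidungOk_eq, pvBoOk_eq, hsl]
  have hc : ∀ (cx ct : Int),
      ((PySem.Set.ofList (frame.map (fun e => e.take 3))).contains [cx, y, ct] = true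
        ↔ ∃ e ∈ frame, e.take 3 = [cx, y, ct]) := by
    intro cx ct
    simp [List.contains_eq_mem, PySem.Set.mem_ofList, List.mem_map]
  constructor
  · rintro ⟨hA, hB, hC, hD⟩ e he
    refine ⟨?_, ?_, ?_, ?_⟩ <;> intro hp
    · rw [if_pos ((hc x 0).2 ⟨e, he, hp⟩)] at hA; simpa using hA
    · rw [if_pos ((hc x 1).2 ⟨e, he, hp⟩)] at hB; simpa using hB
    · rw [if_pos ((hc (x+1) 0).2 ⟨e, he, hp⟩)] at hC; simpa using hC
    · rw [if_pos ((hc (x+1) 1).2 ⟨e, he, hp⟩)] at hD; simpa using hD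
  · intro h
    refine ⟨?_, ?_, ?_, ?_⟩
    · split_ifs with hm hi
      · obtain ⟨e, he, hp⟩ := (hc x 0).1 hm; exact (h e he).1 hp
      · exact absurd (by decide) hi
      · rfl
    · split_ifs with hm hi
      · exact absurd hi (by decide)
      · obtain ⟨e, he, hp⟩ := (hc x 1).1 hm; exact (h e he).2.1 hp
      · rfl
    · split_ifs with hm hi
      · obtain ⟨e, he, hp⟩ := (hc (x+1) 0).1 hm; exact (h e he).2.2.1 hp
      · exact absurd (by decide) hi
      · rfl
    · split_ifs with hm hi
      · exact absurd hi (by decide)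
      · obtain ⟨e, he, hp⟩ := (hc (x+1) 1).1 hm; exact (h e he).2.2.2 hp
      · rfl

-- ===== VERDICT (by name: the statement is the Claim_ definition above) =====
theorem bo_delete_test_spec : Claim_equal_bo_delete_test := by
  intro x y frame _ _
  unfold Spec_bo_delete_test bo_delete_test
  rw [Bool.eq_iff_iff, boDelGo_eq_all, alt_eq_all]
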